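-- pv_equiv track=rewrite | github.com/koii-network/prometheus-beta | src/consecutive_substring_sum.py | max_consecutive_substring_sum
-- ===== SOURCE A (Python) =====
-- def max_consecutive_substring_sum(input_string):
--     """
--     Calculate the maximum sum of consecutive characters that are also consecutive in the input string.
--
--     Args:
--         input_string (str): The input string to analyze
--
--     Returns:
--         int: The maximum sum of consecutive characters
--
--     Raises:
--         ValueError: If input is not a string
--     """
--     # Validate input
--     if not isinstance(input_string, str):
--         raise ValueError("Input must be a string")
--
--     # If string is empty, return 0
--     if not input_string:
--         return 0
--
--     # Convert characters to their numeric values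
--     char_values = [ord(char) for char in input_string]
--
--     # Track max sum and current sum
--     max_sum = current_sum = char_values[0]
--
--     for i in range(1, len(char_values)):
--         # Check if current character is consecutive with previous character
--         if char_values[i] == char_values[i-1] + 1:
--             current_sum += char_values[i]
--         else:
--             # Reset current sum to current character value
--             current_sum = char_values[i]
--
--         # Update max sum if current sum is larger
--         max_sum = max(max_sum, current_sum)
--
--     return max_sum
-- ===== SOURCE B (Python) =====
-- def max_consecutive_substring_sum(input_string):
--     """Max sum of a maximal consecutive-ordinal character run.
--
--     Jumps run by run: an inner scan finds the end of the current maximal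
--     consecutive-ordinal run, whose sum is computed in closed form as an
--     arithmetic series L*first + L*(L-1)//2; no per-character running sum
--     or per-character max update is kept.
--     """
--     if not isinstance(input_string, str):
--         raise ValueError("Input must be a string")
--     if not input_string:
--         return 0
--     codes = [ord(c) for c in input_string]
--     n = len(codes)
--     best = None
--     i = 0
--     while i < n:
--         j = i + 1
--         while j < n and codes[j] == codes[j - 1] + 1:
--             j += 1
--         L = j - i
--         s = L * codes[i] + L * (L - 1) // 2
--         if best is None or s > best:
--             best = s
--         i = j
--     return best
-- ===== Notes on version B (the rewrite author's own statement) =====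
-- stated objective: alternative
-- what changed: Replaces A's per-character running-sum/inline-max scan by a run-jumping loop: an inner scan locates the end of each maximal consecutive-ordinal run and its sum is computed in closed form as an arithmetic series L*first + L*(L-1)//2, so no running sum is accumulated.
import Mathlib
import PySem

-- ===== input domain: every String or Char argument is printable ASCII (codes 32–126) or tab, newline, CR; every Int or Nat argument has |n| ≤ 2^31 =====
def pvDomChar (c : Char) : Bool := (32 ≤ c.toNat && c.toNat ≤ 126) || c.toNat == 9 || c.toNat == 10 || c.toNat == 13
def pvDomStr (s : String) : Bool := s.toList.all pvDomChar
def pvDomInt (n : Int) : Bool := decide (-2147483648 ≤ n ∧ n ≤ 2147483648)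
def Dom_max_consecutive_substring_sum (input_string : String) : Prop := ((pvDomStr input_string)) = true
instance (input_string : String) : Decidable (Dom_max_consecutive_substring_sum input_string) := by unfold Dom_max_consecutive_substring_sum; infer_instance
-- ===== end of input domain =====

-- B replaces A's per-character running-sum/inline-max scan by a run-jumping loop whose
-- per-run sum is the closed-form arithmetic series L*first + L*(L-1)//2 (alternative, same cost).

-- ===== PORT A =====
def max_consecutive_substring_sum (input_string : String) : Int :=
  if input_string.toList.isEmpty then 0
  else
    let char_values := input_string.toList.map (fun c => (c.toNat : Int))
    let init := PySem.List.pyGetD char_values 0 0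
    let r := (PySem.List.pyRange 1 (PySem.List.len char_values) 1).foldl
      (fun (st : Int × Int) i =>
        let current_sum :=
          if PySem.List.pyGetD char_values i 0 = PySem.List.pyGetD char_values (i-1) 0 + 1
          then st.2 + PySem.List.pyGetD char_values i 0
          else PySem.List.pyGetD char_values i 0
        (max st.1 current_sum, current_sum))
      (init, init)
    r.1

-- ===== PORT B =====
-- inner 'while j < n and codes[j] == codes[j-1] + 1: j += 1' of Source B
-- (indices are always in range here, so List.getD is exact for codes[j], codes[j-1])
def scanRunB (codes : List Int) (j : Nat) : Nat :=
  if h : j < codes.length ∧ codes.getD j 0 = codes.getD (j-1) 0 + 1 then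
    scanRunB codes (j+1)
  else j
termination_by codes.length - j
decreasing_by omega

-- the loop never shrinks j (needed by loopB's termination argument)
theorem scanRunB_ge (codes : List Int) (j : Nat) : j ≤ scanRunB codes j := by
  fun_induction scanRunB codes j with
  | case1 j h ih => omega
  | case2 j h => omega

-- outer 'while i < n' of Source B; best is Python's best (None before the first run)
def loopB (codes : List Int) (i : Nat) (best : Option Int) : Int :=
  if h : i < codes.length then
    let j := scanRunB codes (i+1)
    let L : Int := (j : Int) - (i : Int)
    let s := L * codes.getD i 0 + PySem.Int.floordiv (L * (L - 1)) 2
    let best' : Option Int := match best with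
      | none => some s
      | some b => if s > b then some s else some b
    loopB codes j best'
  else
    match best with
    | some b => b
    | none => 0   -- unreachable: loopB is entered with codes ≠ [], so best was set
termination_by codes.length - i
decreasing_by
  have := scanRunB_ge codes (i+1)
  omega

def max_consecutive_substring_sum_alt (input_string : String) : Int :=
  if input_string.toList.isEmpty then 0
  else loopB (input_string.toList.map (fun c => (c.toNat : Int))) 0 none

-- ===== PRECONDITION & SPEC =====
def Spec_max_consecutive_substring_sum (input_string : String) (out : Int) : Prop := out = max_consecutive_substring_sum_alt input_string
instance (input_string : String) (out : Int) : Decidable (Spec_max_consecutive_substring_sum input_string out) := by unfold Spec_max_consecutive_substring_sum; infer_instance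

-- ===== CLAIM (what is proved, stated in full; the proofs are below) =====
def Claim_equal_max_consecutive_substring_sum : Prop := ∀ (input_string : String), Dom_max_consecutive_substring_sum input_string → Spec_max_consecutive_substring_sum input_string (max_consecutive_substring_sum input_string)

-- ===== LEMMAS AND PROOFS =====

-- structural form of A's loop: prev carried instead of re-indexed
def loopA (prev ms cs : Int) : List Int → Int
  | [] => ms
  | x :: xs =>
    let cs' := if x = prev + 1 then cs + x else x
    loopA x (max ms cs') cs' xs

-- A's indexed fold over pyRange equals the structural loopA on the dropped suffix
theorem foldA_eq_loopA (vals : List Int) :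
    ∀ (tail : List Int) (a : Nat), 1 ≤ a → vals.drop a = tail →
    ∀ (ms cs : Int),
    ((PySem.List.pyRange (a : Int) (PySem.List.len vals) 1).foldl
      (fun (st : Int × Int) i =>
        let current_sum :=
          if PySem.List.pyGetD vals i 0 = PySem.List.pyGetD vals (i-1) 0 + 1
          then st.2 + PySem.List.pyGetD vals i 0
          else PySem.List.pyGetD vals i 0
        (max st.1 current_sum, current_sum))
      (ms, cs)).1 = loopA (vals.getD (a-1) 0) ms cs tail := by
  intro tail
  induction tail with
  | nil =>
    intro a ha hd ms cs
    have hlen : vals.length ≤ a := by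
      by_contra h
      push Not at h
      have := List.drop_eq_nil_iff.mp hd
      omega
    rw [PySem.List.len_eq, PySem.List.pyRange_one_eq_nil (by exact_mod_cast hlen)]
    simp [loopA]
  | cons x xs ih =>
    intro a ha hd ms cs
    have hlt : a < vals.length := by
      by_contra h
      push Not at h
      rw [List.drop_eq_nil_iff.mpr h] at hd
      exact absurd hd (by simp)
    have hx : vals.getD a 0 = x := by
      have : vals[a]? = some x := by
        have h2 : (vals.drop a)[0]? = some x := by rw [hd]; rfl
        rw [List.getElem?_drop] at h2
        simpa using h2
      simp [List.getD, this]
    rw [PySem.List.len_eq, PySem.List.pyRange_one_cons (by exact_mod_cast hlt)]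
    simp only [List.foldl_cons]
    have hga : PySem.List.pyGetD vals (a : Int) 0 = x := by
      rw [PySem.List.pyGetD_natCast]; exact hx
    have hgp : PySem.List.pyGetD vals ((a : Int) - 1) 0 = vals.getD (a-1) 0 := by
      have : ((a : Int) - 1) = ((a - 1 : Nat) : Int) := by omega
      rw [this, PySem.List.pyGetD_natCast]
    have hrec : ((a : Int) + 1) = ((a + 1 : Nat) : Int) := by omega
    rw [hga, hgp, hrec, ← PySem.List.len_eq,
        ih (a+1) (by omega) (by rw [← List.drop_drop, hd]; simp) _ _]
    simp only [loopA, Nat.add_sub_cancel, hx]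

-- running max over the runs of xs, starting inside a run with prefix sum cs ending at prev
def runMax (cs prev : Int) : List Int → Int
  | [] => cs
  | x :: t => if x = prev + 1 then runMax (cs + x) x t else max cs (runMax x x t)

-- split off the leading maximal consecutive run: length (incl. the head v) and remainder
def splitRun (v : Int) : List Int → Nat × List Int
  | [] => (1, [])
  | x :: t => if x = v + 1 then ((splitRun x t).1 + 1, (splitRun x t).2) else (1, x :: t)

theorem splitRun_len (v : Int) (xs : List Int) : (splitRun v xs).2.length ≤ xs.length := by
  induction xs generalizing v with
  | nil => simp [splitRun]
  | cons x t ih =>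
    simp only [splitRun]
    split_ifs
    · exact le_trans (ih x) (by simp)
    · simp

-- run-by-run maximum with the closed-form arithmetic-series sum per run (B's value)
def bestL (v : Int) (rest : List Int) : Int :=
  let L : Int := ((splitRun v rest).1 : Int)
  let s := L * v + PySem.Int.floordiv (L * (L - 1)) 2
  match h : (splitRun v rest).2 with
  | [] => s
  | r :: rs => max s (bestL r rs)
termination_by rest.length
decreasing_by
  have := splitRun_len v rest
  rw [h] at this
  simp at this
  omega

theorem runMax_ge (xs : List Int) : ∀ (c p : Int), (∀ x ∈ xs, 0 ≤ x) → c ≤ runMax c p xs := by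
  induction xs with
  | nil => intro c p _; simp [runMax]
  | cons x t ih =>
    intro c p hn
    have hx : 0 ≤ x := hn x (by simp)
    have ht : ∀ y ∈ t, 0 ≤ y := fun y hy => hn y (by simp [hy])
    simp only [runMax]
    split_ifs
    · exact le_trans (by omega) (ih (c + x) x ht)
    · exact le_max_left _ _

-- A's loop keeps the running max inline; with ms already ≥ cs it is 'max ms' of runMax
theorem loopA_eq (xs : List Int) : ∀ (prev ms cs : Int), (∀ x ∈ xs, 0 ≤ x) → cs ≤ ms →
    loopA prev ms cs xs = max ms (runMax cs prev xs) := by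
  induction xs with
  | nil => intro prev ms cs _ hle; simp only [loopA, runMax]; omega
  | cons x t ih =>
    intro prev ms cs hn hle
    have hx : 0 ≤ x := hn x (by simp)
    have ht : ∀ y ∈ t, 0 ≤ y := fun y hy => hn y (by simp [hy])
    simp only [loopA, runMax]
    split_ifs
    · rw [ih x (max ms (cs + x)) (cs + x) ht (le_max_right _ _)]
      have := runMax_ge t (cs + x) x ht
      omega
    · rw [ih x (max ms x) x ht (le_max_right _ _)]
      have := runMax_ge t x x ht
      omega

-- 'max over the remaining runs' combiner shared by bestL's unfolding and the loops
def restMax (s : Int) : List Int → Int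
  | [] => s
  | r :: rs => max s (bestL r rs)

theorem bestL_eq (v : Int) (rest : List Int) :
    bestL v rest = restMax (((splitRun v rest).1 : Int) * v +
      PySem.Int.floordiv (((splitRun v rest).1 : Int) * (((splitRun v rest).1 : Int) - 1)) 2)
      (splitRun v rest).2 := by
  rw [bestL]
  cases hs : (splitRun v rest).2 <;> simp [restMax]

-- the arithmetic series grows by L when the run grows by one element
theorem floordiv_series_step (L : Int) :
    PySem.Int.floordiv ((L + 1) * L) 2 = PySem.Int.floordiv (L * (L - 1)) 2 + L := by
  obtain ⟨k, hk⟩ := Int.even_mul_succ_self (L - 1)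
  have h1 : L * (L - 1) = 2 * k := by linear_combination hk
  have h2 : (L + 1) * L = 2 * (k + L) := by linear_combination hk
  rw [PySem.Int.floordiv_eq_ediv_of_pos (by norm_num),
      PySem.Int.floordiv_eq_ediv_of_pos (by norm_num), h1, h2]
  omega

-- runMax entered mid-run (prefix sum cs ending at prev) in terms of the run split
theorem runMax_split (xs : List Int) : ∀ (cs prev : Int), (∀ x ∈ xs, 0 ≤ x) →
    runMax cs prev xs =
      restMax (cs + (((splitRun prev xs).1 : Int) - 1) * prev +
        PySem.Int.floordiv (((splitRun prev xs).1 : Int) * (((splitRun prev xs).1 : Int) - 1)) 2)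
        (splitRun prev xs).2 := by
  induction xs with
  | nil =>
    intro cs prev _
    simp only [runMax, splitRun, restMax]
    have h0 : PySem.Int.floordiv (((1:Nat) : Int) * (((1:Nat) : Int) - 1)) 2 = 0 := by decide
    rw [h0]
    push_cast
    ring
  | cons x t ih =>
    intro cs prev hn
    have ht : ∀ y ∈ t, 0 ≤ y := fun y hy => hn y (by simp [hy])
    simp only [runMax, splitRun]
    split_ifs with hc
    · rw [ih (cs + x) x ht]
      have hL : (((splitRun x t).1 + 1 : Nat) : Int) = ((splitRun x t).1 : Int) + 1 := by
        push_cast; ring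
      simp only [hL, add_sub_cancel_right]
      rw [floordiv_series_step]
      subst hc
      congr 1
      ring
    · rw [ih x x ht]
      have : restMax (x + (((splitRun x t).1 : Int) - 1) * x +
          PySem.Int.floordiv (((splitRun x t).1 : Int) * (((splitRun x t).1 : Int) - 1)) 2)
          (splitRun x t).2 = bestL x t := by
        rw [bestL_eq]
        congr 1
        ring
      rw [this]
      simp only [restMax]
      have h0 : PySem.Int.floordiv (((1:Nat) : Int) * (((1:Nat) : Int) - 1)) 2 = 0 := by decide
      rw [h0]
      congr 1
      push_cast
      ring

theorem runMax_eq_bestL (v : Int) (xs : List Int) (hn : ∀ x ∈ xs, 0 ≤ x) :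
    runMax v v xs = bestL v xs := by
  rw [runMax_split xs v v hn, bestL_eq]
  congr 1
  ring

-- the inner scan never passes the end of the list
theorem scanRunB_le (codes : List Int) (j : Nat) (h : j ≤ codes.length) :
    scanRunB codes j ≤ codes.length := by
  fun_induction scanRunB codes j with
  | case1 j h' ih => exact ih (by omega)
  | case2 j h' => omega

-- the inner scan computes exactly the split of the leading run at position j-1
theorem scan_split (codes : List Int) (j : Nat) :
    1 ≤ j →
    splitRun (codes.getD (j-1) 0) (codes.drop j)
      = (scanRunB codes j + 1 - j, codes.drop (scanRunB codes j)) := by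
  fun_induction scanRunB codes j with
  | case1 j h ih =>
    intro hj
    have hdrop : codes.drop j = codes.getD j 0 :: codes.drop (j+1) := by
      rw [List.getD_eq_getElem _ _ h.1]
      exact List.drop_eq_getElem_cons h.1
    have hscan : scanRunB codes j = scanRunB codes (j+1) := by
      rw [scanRunB, dif_pos h]
    specialize ih (by omega)
    simp only [Nat.add_sub_cancel] at ih
    rw [hdrop]
    simp only [splitRun, if_pos h.2]
    rw [ih]
    have hge := scanRunB_ge codes (j+1)
    simp only [Prod.mk.injEq]
    exact ⟨by omega, trivial⟩
  | case2 j h =>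
    intro hj
    by_cases hjl : j < codes.length
    · have hne : ¬ codes.getD j 0 = codes.getD (j-1) 0 + 1 := fun hc => h ⟨hjl, hc⟩
      have hdrop : codes.drop j = codes.getD j 0 :: codes.drop (j+1) := by
        rw [List.getD_eq_getElem _ _ hjl]
        exact List.drop_eq_getElem_cons hjl
      rw [hdrop]
      simp only [splitRun, if_neg hne]
      rw [← hdrop]
      simp only [Prod.mk.injEq]
      exact ⟨by omega, trivial⟩
    · have hdrop : codes.drop j = [] := List.drop_eq_nil_of_le (by omega)
      rw [hdrop]
      simp only [splitRun, Prod.mk.injEq]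
      exact ⟨by omega, trivial⟩

-- the outer loop computes the run-by-run max with the closed-form sums
theorem loopB_eq (codes : List Int) :
    ∀ (k i : Nat), codes.length - i ≤ k → i < codes.length → ∀ (best : Option Int),
    loopB codes i best =
      (match best with
       | none => bestL (codes.getD i 0) (codes.drop (i+1))
       | some b => max b (bestL (codes.getD i 0) (codes.drop (i+1)))) := by
  intro k
  induction k with
  | zero => intro i hk hi best; omega
  | succ k ih =>
    intro i hk hi best
    have hge := scanRunB_ge codes (i+1)
    have hle := scanRunB_le codes (i+1) (by omega)
    have hscan := scan_split codes (i+1) (by omega)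
    simp only [Nat.add_sub_cancel] at hscan
    have harith : scanRunB codes (i+1) + 1 - (i+1) = scanRunB codes (i+1) - i := by omega
    rw [harith] at hscan
    have hcast : ((scanRunB codes (i+1) - i : Nat) : Int)
        = (scanRunB codes (i+1) : Int) - (i : Int) := by
      push_cast [Nat.cast_sub (by omega : i ≤ scanRunB codes (i+1))]
      ring
    have hbestL : bestL (codes.getD i 0) (codes.drop (i+1)) =
        restMax (((scanRunB codes (i+1) : Int) - (i : Int)) * codes.getD i 0 +
          PySem.Int.floordiv (((scanRunB codes (i+1) : Int) - (i : Int)) *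
            (((scanRunB codes (i+1) : Int) - (i : Int)) - 1)) 2)
          (codes.drop (scanRunB codes (i+1))) := by
      rw [bestL_eq, hscan, hcast]
    rw [loopB.eq_def, dif_pos hi]
    by_cases hSl : scanRunB codes (i+1) < codes.length
    · have hdropS : codes.drop (scanRunB codes (i+1)) =
          codes.getD (scanRunB codes (i+1)) 0 :: codes.drop (scanRunB codes (i+1) + 1) := by
        rw [List.getD_eq_getElem _ _ hSl]
        exact List.drop_eq_getElem_cons hSl
      rw [hbestL, hdropS]
      simp only [restMax]
      cases best with
      | none =>
        rw [ih (scanRunB codes (i+1)) (by omega) hSl]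
      | some b =>
        rw [ih (scanRunB codes (i+1)) (by omega) hSl]
        dsimp only
        split_ifs with hgt <;> simp only [max_def] <;> split_ifs <;> omega
    · have hdropS : codes.drop (scanRunB codes (i+1)) = [] :=
        List.drop_eq_nil_of_le (by omega)
      rw [hbestL, hdropS]
      simp only [restMax]
      cases best with
      | none =>
        rw [loopB.eq_def, dif_neg hSl]
      | some b =>
        rw [loopB.eq_def, dif_neg hSl]
        dsimp only
        split_ifs with hgt <;> simp only [max_def] <;> split_ifs <;> omega

-- ===== VERDICT (by name: the statement is the Claim_ definition above) =====
theorem max_consecutive_substring_sum_spec : Claim_equal_max_consecutive_substring_sum := by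
  intro s _
  unfold Spec_max_consecutive_substring_sum
  unfold max_consecutive_substring_sum max_consecutive_substring_sum_alt
  by_cases he : s.toList.isEmpty
  · simp [he]
  · have hif : s.toList.isEmpty = false := by simpa using he
    simp only [hif, Bool.false_eq_true, if_false]
    obtain ⟨c0, rest, hsplit⟩ : ∃ c0 rest, s.toList = c0 :: rest := by
      cases h : s.toList with
      | nil => simp [h] at he
      | cons a b => exact ⟨a, b, rfl⟩
    set vals : List Int := s.toList.map (fun c => (c.toNat : Int)) with hvals
    have hvc : vals = (c0.toNat : Int) :: rest.map (fun c => (c.toNat : Int)) := by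
      rw [hvals, hsplit, List.map_cons]
    set v0 : Int := (c0.toNat : Int)
    set vs : List Int := rest.map (fun c => (c.toNat : Int)) with hvs
    have hget0 : PySem.List.pyGetD vals 0 0 = v0 := by
      rw [hvc]; simp [PySem.List.pyGetD]
    have hnn : ∀ x ∈ vals, 0 ≤ x := by
      intro x hx
      rw [hvals] at hx
      obtain ⟨c, _, rfl⟩ := List.mem_map.mp hx
      exact Int.natCast_nonneg _
    have hnnvs : ∀ x ∈ vs, 0 ≤ x := by
      intro x hx
      exact hnn x (by rw [hvc]; exact List.mem_cons_of_mem _ hx)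
    -- A side: indexed fold → structural loopA → runMax → bestL
    have hdrop : vals.drop 1 = vs := by rw [hvc]; rfl
    have hA := foldA_eq_loopA vals vs 1 (le_refl 1) hdrop v0 v0
    simp only [Nat.sub_self] at hA
    have hgd : vals.getD 0 0 = v0 := by rw [hvc]; rfl
    rw [hgd] at hA
    rw [hget0]
    rw [show ((1:Nat):Int) = (1:Int) from rfl] at hA
    rw [hA, loopA_eq vs v0 v0 v0 hnnvs (le_refl v0), runMax_eq_bestL v0 vs hnnvs]
    have hge := runMax_ge vs v0 v0 hnnvs
    rw [runMax_eq_bestL v0 vs hnnvs] at hge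
    have hAfin : max v0 (bestL v0 vs) = bestL v0 vs := by omega
    rw [hAfin]
    -- B side: loopB from index 0 computes bestL of the whole list
    have hlen : 0 < vals.length := by rw [hvc]; simp
    have hB := loopB_eq vals vals.length 0 (by omega) hlen none
    simp only at hB
    rw [hB, hgd]
    rw [show vals.drop (0+1) = vs from hdrop]
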